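-- pv_equiv track=rewrite | github.com/pypi-data/pypi-mirror-96 | packages/torchplus/torchplus-0.2.6.tar.gz/torchplus-0.2.6/torchplus/tensor.py | _replace_sequence_with_key
-- ===== SOURCE A (Python) =====
-- def _replace_sequence_with_key(original, sequence, key=-1):
--     sequence = list(sequence)
--     result = list()
--     index = 0
--     for t in original:
--         if index < len(sequence) and t == sequence[index]:
--             result.append(key)
--             index += 1
--         else:
--             result.append(t)
--     assert index == len(sequence)
--     return original.__class__(result)
-- ===== SOURCE B (Python) =====
-- def _replace_sequence_with_key(original, sequence, key=-1):
--     items = list(original)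
--     result = list(items)
--     start = 0
--     for s in sequence:
--         i = items.index(s, start)
--         result[i] = key
--         start = i + 1
--     return original.__class__(result)
-- ===== Notes on version B (the rewrite author's own statement) =====
-- stated objective: alternative
-- what changed: B iterates over the sequence, locating each element with list.index(s, start) and overwriting a copy of original in place, instead of scanning original with a match pointer and appending to a fresh result.
import Mathlib
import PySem

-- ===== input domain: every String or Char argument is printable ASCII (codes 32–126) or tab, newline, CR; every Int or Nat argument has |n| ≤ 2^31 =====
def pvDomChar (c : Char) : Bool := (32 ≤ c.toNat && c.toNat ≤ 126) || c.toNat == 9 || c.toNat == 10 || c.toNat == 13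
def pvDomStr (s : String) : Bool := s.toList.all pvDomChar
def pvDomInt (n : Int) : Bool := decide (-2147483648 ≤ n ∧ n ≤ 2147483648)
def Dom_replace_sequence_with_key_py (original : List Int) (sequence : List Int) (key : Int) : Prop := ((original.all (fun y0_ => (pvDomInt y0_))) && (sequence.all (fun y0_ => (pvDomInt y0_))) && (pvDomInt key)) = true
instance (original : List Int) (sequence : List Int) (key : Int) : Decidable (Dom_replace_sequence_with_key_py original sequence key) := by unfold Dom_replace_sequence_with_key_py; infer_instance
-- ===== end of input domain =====

-- B locates each sequence element with list.index(s, start) and overwrites a copy of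
-- original in place, instead of scanning original with a match pointer and appending
-- (alternative decomposition, same cost). Pre_ excludes inputs where A raises AssertionError.


-- ===== PORT A =====
-- the 'for t in original' loop: state (result, index); result.append via ++ [·]
def pvALoop (sequence : List Int) (key : Int) :
    List Int → List Int → Nat → List Int × Nat
  | [], result, index => (result, index)
  | t :: rest, result, index =>
    if index < sequence.length ∧ sequence.getD index 0 = t then
      pvALoop sequence key rest (result ++ [key]) (index + 1)
    else
      pvALoop sequence key rest (result ++ [t]) index

-- the final 'assert index == len(sequence)' raises exactly outside Pre_; the port returns result
def replace_sequence_with_key_py (original : List Int) (sequence : List Int) (key : Int) : List Int :=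
  (pvALoop sequence key original [] 0).1

-- ===== PORT B =====
-- the 'for s in sequence' loop: state (result, start); items.index(s, start) ported as
-- findIdx? on items.drop start (none = ValueError, only outside Pre_); result[i] = key via List.set
def pvBLoop (items : List Int) (key : Int) :
    List Int → List Int → Nat → Option (List Int)
  | [], result, _ => some result
  | s :: seq, result, start =>
    match (items.drop start).findIdx? (· == s) with
    | none => none
    | some j => pvBLoop items key seq (result.set (start + j) key) (start + j + 1)

def replace_sequence_with_key_py_alt (original : List Int) (sequence : List Int) (key : Int) : List Int :=
  (pvBLoop original key sequence original 0).getD []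

-- ===== PRECONDITION & SPEC =====
-- Pre_ excludes exactly the inputs where A raises AssertionError (greedy matching of
-- sequence inside original fails, i.e. sequence is not a sublist); B raises ValueError there.
def Pre_replace_sequence_with_key_py (original : List Int) (sequence : List Int) (key : Int) : Prop :=
  List.Sublist sequence original
instance (original : List Int) (sequence : List Int) (key : Int) : Decidable (Pre_replace_sequence_with_key_py original sequence key) := by unfold Pre_replace_sequence_with_key_py; infer_instance

def pvWitness_replace_sequence_with_key_py : List Int × List Int × Int := ([1, 2, 3, 2, 4], [2, 2], -1)

def Spec_replace_sequence_with_key_py (original : List Int) (sequence : List Int) (key : Int) (out : List Int) : Prop := out = replace_sequence_with_key_py_alt original sequence key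
instance (original : List Int) (sequence : List Int) (key : Int) (out : List Int) : Decidable (Spec_replace_sequence_with_key_py original sequence key out) := by unfold Spec_replace_sequence_with_key_py; infer_instance

-- ===== CLAIM (what is proved, stated in full; the proofs are below) =====
def Claim_equal_replace_sequence_with_key_py : Prop := ∀ (original : List Int) (sequence : List Int) (key : Int), Dom_replace_sequence_with_key_py original sequence key → Pre_replace_sequence_with_key_py original sequence key → Spec_replace_sequence_with_key_py original sequence key (replace_sequence_with_key_py original sequence key)

-- ===== LEMMAS AND PROOFS =====

-- canonical greedy replacement, recursion on both lists (proof device)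
def pvG (key : Int) : List Int → List Int → List Int
  | [], _ => []
  | t :: l, [] => t :: pvG key l []
  | t :: l, s :: seq => if s = t then key :: pvG key l seq else t :: pvG key l (s :: seq)

-- A's loop computes pvG
theorem pvALoop_eq_g (sequence : List Int) (key : Int) :
    ∀ (l res : List Int) (idx : Nat),
      (pvALoop sequence key l res idx).1 = res ++ pvG key l (sequence.drop idx) := by
  intro l
  induction l with
  | nil => intro res idx; simp [pvALoop, pvG]
  | cons t rest ih =>
    intro res idx
    by_cases h : idx < sequence.length
    · have hdrop : sequence.drop idx = sequence[idx] :: sequence.drop (idx + 1) :=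
        List.drop_eq_getElem_cons h
      have hgetD : sequence.getD idx 0 = sequence[idx] := List.getD_eq_getElem _ _ h
      by_cases he : sequence[idx] = t
      · have : idx < sequence.length ∧ sequence.getD idx 0 = t := ⟨h, by rw [hgetD, he]⟩
        simp only [pvALoop, if_pos this, ih, hdrop, pvG, if_pos he, List.append_assoc,
          List.singleton_append]
      · have : ¬ (idx < sequence.length ∧ sequence.getD idx 0 = t) := by
          rintro ⟨_, hc⟩; rw [hgetD] at hc; exact he hc
        simp only [pvALoop, if_neg this, ih, hdrop, pvG, if_neg he, List.append_assoc,
          List.singleton_append]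
    · have hdrop : sequence.drop idx = [] := List.drop_eq_nil_of_le (by omega)
      have : ¬ (idx < sequence.length ∧ sequence.getD idx 0 = t) := by
        rintro ⟨hc, _⟩; exact h hc
      simp only [pvALoop, if_neg this, ih, hdrop, pvG, List.append_assoc,
        List.singleton_append]

-- first occurrence found ⇒ pvG splits at it
theorem pvG_first (key s : Int) :
    ∀ (d : List Int) (j : Nat), d.findIdx? (· == s) = some j →
      ∀ seq, pvG key d (s :: seq) = d.take j ++ key :: pvG key (d.drop (j + 1)) seq := by
  intro d
  induction d with
  | nil => intro j hj; simp at hj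
  | cons x d' ih =>
    intro j hj seq
    rw [List.findIdx?_cons] at hj
    by_cases hx : x = s
    · subst hx
      simp only [BEq.rfl] at hj
      cases hj
      simp [pvG]
    · have hb : (x == s) = false := by simp [hx]
      simp only [hb] at hj
      rcases Option.map_eq_some_iff.mp hj with ⟨j', hj', rfl⟩
      have hsx : s ≠ x := fun h => hx h.symm
      simp only [pvG, if_neg hsx, ih j' hj', List.take_succ_cons, List.drop_succ_cons,
        List.cons_append]

-- sublist survives cutting at the first occurrence
theorem sublist_drop_of_findIdx? (s : Int) :
    ∀ (d seq : List Int) (j : Nat), List.Sublist (s :: seq) d → d.findIdx? (· == s) = some j →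
      List.Sublist seq (d.drop (j + 1)) := by
  intro d
  induction d with
  | nil => intro seq j hs; exact absurd hs (by simp)
  | cons x d' ih =>
    intro seq j hs hj
    rw [List.findIdx?_cons] at hj
    by_cases hx : x = s
    · subst hx
      simp only [BEq.rfl] at hj
      cases hj
      cases hs with
      | cons _ h => exact (List.sublist_cons_self _ seq).trans h
      | cons₂ _ h => exact h
    · have hb : (x == s) = false := by simp [hx]
      simp only [hb] at hj
      rcases Option.map_eq_some_iff.mp hj with ⟨j', hj', rfl⟩
      have hs' : List.Sublist (s :: seq) d' := by
        cases hs with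
        | cons _ h => exact h
        | cons₂ _ h => exact absurd rfl hx
      clear hj
      simpa using ih seq j' hs' hj'

-- a sublist's head is found
theorem findIdx?_isSome_of_sublist (s : Int) (seq d : List Int) (h : List.Sublist (s :: seq) d) :
    (d.findIdx? (· == s)).isSome := by
  rw [List.findIdx?_isSome]
  exact List.any_of_mem (h.subset (List.mem_cons_self)) (by simp)

-- B's loop computes pvG under the sublist invariant
theorem pvBLoop_eq_g (items : List Int) (key : Int) :
    ∀ (seq result : List Int) (start : Nat),
      List.Sublist seq (items.drop start) →
      result.length = items.length →
      result.drop start = items.drop start →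
      pvBLoop items key seq result start =
        some (result.take start ++ pvG key (items.drop start) seq) := by
  intro seq
  induction seq with
  | nil =>
    intro result start _ hlen hdrop
    have : pvG key (items.drop start) [] = items.drop start := by
      generalize items.drop start = d
      induction d with
      | nil => rfl
      | cons a b ihb => simp [pvG, ihb]
    rw [pvBLoop, this, ← hdrop, List.take_append_drop]
  | cons s seq' ih =>
    intro result start hsub hlen hdrop
    have hfs := findIdx?_isSome_of_sublist s seq' (items.drop start) hsub
    rcases Option.isSome_iff_exists.mp hfs with ⟨j, hj⟩
    have hjlt : j < (items.drop start).length := by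
      have := List.findIdx?_eq_some_iff_findIdx_eq.mp hj
      omega
    have hlt : start + j < items.length := by
      have := List.length_drop (l := items) (i := start); omega
    have hgen : ∀ (l : List Int), l.drop (start + j + 1) = (l.drop start).drop (j + 1) := by
      intro l; rw [Nat.add_assoc, List.drop_drop]
    have hsub' : List.Sublist seq' (items.drop (start + j + 1)) := by
      have h := sublist_drop_of_findIdx? s (items.drop start) seq' j hsub hj
      rwa [← hgen] at h
    have hlen' : (result.set (start + j) key).length = items.length := by
      simp [hlen]
    have hdropset : (result.set (start + j) key).drop (start + j + 1) =
        items.drop (start + j + 1) := by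
      rw [List.drop_set_of_lt (by omega), hgen, hdrop, ← hgen]
    rw [pvBLoop, hj]
    show pvBLoop items key seq' (result.set (start + j) key) (start + j + 1) = _
    rw [ih (result.set (start + j) key) (start + j + 1) hsub' hlen' hdropset]
    congr 1
    have htakejs : result.take (start + j) = result.take start ++ (items.drop start).take j := by
      rw [← hdrop, ← List.take_add]
    have htake : (result.set (start + j) key).take (start + j + 1) =
        result.take start ++ (items.drop start).take j ++ [key] := by
      rw [List.take_set]
      have h1 : result.take (start + j + 1) =
          result.take (start + j) ++ ((result.drop (start + j)).take 1) := by
        rw [← List.take_add]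
      have hdnil : result.drop (start + j) ≠ [] := by
        intro hnil
        have := congrArg List.length hnil
        simp at this
        omega
      rcases hx : result.drop (start + j) with _ | ⟨a, tl⟩
      · exact absurd hx hdnil
      · rw [h1, hx]
        have hlens : (result.take (start + j)).length = start + j := by
          simp; omega
        rw [List.set_append_right _ _ (le_of_eq hlens), hlens]
        simp [htakejs]
    rw [htake]
    have hdd : items.drop (start + j + 1) = ((items.drop start).drop (j + 1)) := hgen items
    rw [pvG_first key s (items.drop start) j hj seq', hdd]
    simp

-- ===== VERDICT (by name: the statement is the Claim_ definition above) =====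
theorem replace_sequence_with_key_py_spec : Claim_equal_replace_sequence_with_key_py := by
  intro original sequence key _ hpre
  unfold Spec_replace_sequence_with_key_py
  unfold replace_sequence_with_key_py replace_sequence_with_key_py_alt
  rw [pvALoop_eq_g]
  rw [pvBLoop_eq_g original key sequence original 0
        (by simpa using hpre) rfl rfl]
  simp
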